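-- pv_equiv track=rewrite | github.com/greywidget/platform-dependencies | 72/belt.py | get_belt
-- ===== SOURCE A (Python) =====
-- from collections import OrderedDict
--
-- scores = [10, 50, 100, 175, 250, 400, 600, 800, 1000]
--
-- belts = "white yellow orange green blue brown black paneled red".split()
--
-- def get_belt(user_score, scores=scores, belts=belts):
--     from_score = scores[0::]
--     to_score = scores[1::]
--     mapper = OrderedDict(zip(zip(from_score, to_score), belts))
--     if user_score < 10:
--         return None
--     elif user_score >= 1000:
--         return belts[-1]
--
--     for k, v in mapper.items():
--         if k[0] <= user_score < k[1]:
--             return v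
-- ===== SOURCE B (Python) =====
-- scores = [10, 50, 100, 175, 250, 400, 600, 800, 1000]
--
-- belts = "white yellow orange green blue brown black paneled red".split()
--
-- def get_belt(user_score, scores=scores, belts=belts):
--     if user_score < 10:
--         return None
--     if user_score >= 1000:
--         return belts[-1]
--     return _lookup(user_score, scores, belts)
--
-- def _lookup(u, scores, belts):
--     # recursion on the structure of both lists, interval = current head pair
--     if len(scores) < 2 or not belts:
--         return None
--     if scores[0] <= u < scores[1]:
--         return belts[0]
--     return _lookup(u, scores[1:], belts[1:])
-- ===== Notes on version B (the rewrite author's own statement) =====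
-- stated objective: simpler
-- what changed: B replaces A's staged slice/zip/OrderedDict construction plus dict-items loop with a direct structural recursion over the two lists (head interval vs. tail), building no intermediate dict and stopping at the first match.
-- outside the precondition, e.g. on get_belt(15, [10, 20, 10, 20], ['a', 'b', 'c']): A returns 'c', B returns 'a'
import Mathlib
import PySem

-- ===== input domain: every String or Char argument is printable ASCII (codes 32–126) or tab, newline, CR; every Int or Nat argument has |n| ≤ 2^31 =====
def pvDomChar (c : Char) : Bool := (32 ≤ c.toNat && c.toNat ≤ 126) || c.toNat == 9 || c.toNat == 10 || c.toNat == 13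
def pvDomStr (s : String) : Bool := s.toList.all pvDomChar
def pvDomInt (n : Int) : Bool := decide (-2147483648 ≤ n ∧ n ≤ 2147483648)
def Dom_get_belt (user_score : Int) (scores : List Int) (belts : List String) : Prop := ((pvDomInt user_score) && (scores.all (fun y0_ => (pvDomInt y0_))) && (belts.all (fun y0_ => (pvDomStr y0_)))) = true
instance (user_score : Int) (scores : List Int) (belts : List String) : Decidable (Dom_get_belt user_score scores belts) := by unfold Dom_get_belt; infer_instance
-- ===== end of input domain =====

-- B replaces A's slice/zip/OrderedDict build and items loop by a direct structural recursion
-- over the two lists: simpler, no intermediate containers. Equivalence is about the return value.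

-- ===== PORT A =====
-- A's `for k, v in mapper.items(): if k[0] <= user_score < k[1]: return v` loop
def beltLoop (u : Int) : List ((Int × Int) × String) → Option String
  | [] => none
  | (k, v) :: rest => if k.1 ≤ u ∧ u < k.2 then some v else beltLoop u rest

def get_belt (user_score : Int) (scores : List Int) (belts : List String) : Option String :=
  let from_score := PySem.List.slice scores (some 0) none
  let to_score := PySem.List.slice scores (some 1) none
  -- OrderedDict(zip(zip(from_score, to_score), belts)): insert the pairs in order
  let mapper : PySem.Dict (Int × Int) String :=
    ((from_score.zip to_score).zip belts).foldl (fun d p => d.insert p.1 p.2) PySem.Dict.empty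
  if user_score < 10 then none
  else if user_score ≥ 1000 then PySem.List.pyGet? belts (-1)
  else beltLoop user_score mapper.items

-- ===== PORT B =====
-- B's helper `_lookup`: recursion on the structure of both lists, interval = current head pair
def beltLookup (u : Int) : List Int → List String → Option String
  | lo :: hi :: rest, b :: bs =>
      if lo ≤ u ∧ u < hi then some b else beltLookup u (hi :: rest) bs
  | _, _ => none

def get_belt_alt (user_score : Int) (scores : List Int) (belts : List String) : Option String :=
  if user_score < 10 then none
  else if user_score ≥ 1000 then PySem.List.pyGet? belts (-1)
  else beltLookup user_score scores belts

-- ===== PRECONDITION & SPEC =====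
-- Pre_ excludes (a) user_score ≥ 1000 with empty belts, where A raises IndexError on belts[-1]
-- (B raises there too), and (b) 10 ≤ user_score < 1000 with a duplicate (lo, hi) pair among the
-- zipped intervals, where A's returned belt is an accident of dict overwrite-at-first-position
-- (last value, first slot) while B returns the first matching pair's belt.
def Pre_get_belt (user_score : Int) (scores : List Int) (belts : List String) : Prop :=
  (user_score ≥ 1000 → belts ≠ []) ∧
  (10 ≤ user_score ∧ user_score < 1000 →
    (((scores.zip (scores.drop 1)).zip belts).map Prod.fst).Nodup)
instance (user_score : Int) (scores : List Int) (belts : List String) : Decidable (Pre_get_belt user_score scores belts) := by unfold Pre_get_belt; infer_instance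

def pvWitness_get_belt : Int × List Int × List String :=
  (120, [10, 50, 100, 175, 250, 400, 600, 800, 1000],
   ["white", "yellow", "orange", "green", "blue", "brown", "black", "paneled", "red"])

def Spec_get_belt (user_score : Int) (scores : List Int) (belts : List String) (out : Option String) : Prop := out = get_belt_alt user_score scores belts
instance (user_score : Int) (scores : List Int) (belts : List String) (out : Option String) : Decidable (Spec_get_belt user_score scores belts out) := by unfold Spec_get_belt; infer_instance

-- ===== CLAIM (what is proved, stated in full; the proofs are below) =====
def Claim_equal_get_belt : Prop := ∀ (user_score : Int) (scores : List Int) (belts : List String), Dom_get_belt user_score scores belts → Pre_get_belt user_score scores belts → Spec_get_belt user_score scores belts (get_belt user_score scores belts)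

-- ===== LEMMAS AND PROOFS =====

-- B's structural recursion computes exactly A's first-match loop over the zipped interval list.
theorem beltLookup_eq_beltLoop (u : Int) (scores : List Int) (belts : List String) :
    beltLookup u scores belts = beltLoop u ((scores.zip (scores.drop 1)).zip belts) := by
  induction scores generalizing belts with
  | nil => cases belts <;> rfl
  | cons lo rest ih =>
    cases rest with
    | nil => cases belts <;> rfl
    | cons hi rest' =>
      cases belts with
      | nil => rfl
      | cons b bs =>
        by_cases h : lo ≤ u ∧ u < hi
        · simp [beltLookup, beltLoop, h]
        · simp only [beltLookup, beltLoop, List.drop, List.zip_cons_cons, if_neg h]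
          simpa using ih (belts := bs)

theorem get_belt_spec_aux (user_score : Int) (scores : List Int) (belts : List String)
    (hpre : Pre_get_belt user_score scores belts) :
    get_belt user_score scores belts = get_belt_alt user_score scores belts := by
  unfold get_belt get_belt_alt
  simp only [PySem.List.slice_zero_start, PySem.List.slice_none_none]
  have hdrop : PySem.List.slice scores (some 1) none = scores.drop 1 := by
    have := PySem.List.slice_from_natCast (xs := scores) (a := 1)
    simpa using this
  rw [hdrop]
  by_cases h10 : user_score < 10
  · simp [h10]
  · by_cases h1000 : user_score ≥ 1000
    · simp [h10, h1000]
    · simp only [if_neg h10, if_neg h1000]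
      have hnd : (((scores.zip (scores.drop 1)).zip belts).map Prod.fst).Nodup :=
        hpre.2 ⟨by omega, by omega⟩
      have hitems :
          (((scores.zip (scores.drop 1)).zip belts).foldl
              (fun d p => d.insert p.1 p.2) PySem.Dict.empty).items
            = (scores.zip (scores.drop 1)).zip belts := by
        have := PySem.Dict.items_foldl_insert_fresh
          (l := (scores.zip (scores.drop 1)).zip belts)
          (k := Prod.fst) (v := Prod.snd) (d := (PySem.Dict.empty : PySem.Dict (Int × Int) String))
          (by intro a _; simp [PySem.Dict.contains_empty]) hnd
        simpa using this
      rw [hitems, beltLookup_eq_beltLoop]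

-- ===== VERDICT (by name: the statement is the Claim_ definition above) =====
theorem get_belt_spec : Claim_equal_get_belt := by
  intro user_score scores belts _ hpre
  unfold Spec_get_belt
  exact get_belt_spec_aux user_score scores belts hpre
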